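-- pv_equiv track=rewrite | github.com/Yoshanuikabundi/openff-pablo | openff/pablo/_utils.py | with_neighbours
-- ===== SOURCE A (Python) =====
-- from collections.abc import Callable, Iterable, Iterator, Mapping
-- from typing import (
--     DefaultDict,
--     TypeAlias,
--     TypeVar,
--     TypeVarTuple,
--     no_type_check,
-- )
--
-- T = TypeVar("T")
--
-- U = TypeVar("U")
--
-- def with_neighbours(
--     iterable: Iterable[T],
--     default: U = None,
-- ) -> Iterator[tuple[T | U, T, T | U]]:
--     """Return each element of the iterable with its neighbours.
--
--         abcd -> _ab, abc, bcd, cd_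
--
--     The middle element of the tuple is the current element. Missing neighbours
--     are set to ``default``. The resulting sequence has the same length as the
--     original iterable.
--     """
--     iterator = iter(iterable)
--
--     pred: T | U = default
--     this: T
--     succ: T | U
--
--     try:
--         this = next(iterator)
--     except StopIteration:
--         return
--
--     for succ in iterator:
--         yield (pred, this, succ)
--         pred = this
--         this = succ
--
--     succ = default
--     yield (pred, this, succ)
-- ===== SOURCE B (Python) =====
-- def with_neighbours(iterable, default=None):
--     """Return each element of the iterable with its (pred, this, succ) neighbours."""
--     items = list(iterable)
--     preds = [default] + items[:-1]
--     succs = items[1:] + [default]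
--     yield from zip(preds, items, succs)
-- ===== Notes on version B (the rewrite author's own statement) =====
-- stated objective: idiomatic
-- what changed: Replaces the streaming loop threading rolling pred/this/succ variables with materializing the input and zipping two padded shifted copies of it.
import Mathlib
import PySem

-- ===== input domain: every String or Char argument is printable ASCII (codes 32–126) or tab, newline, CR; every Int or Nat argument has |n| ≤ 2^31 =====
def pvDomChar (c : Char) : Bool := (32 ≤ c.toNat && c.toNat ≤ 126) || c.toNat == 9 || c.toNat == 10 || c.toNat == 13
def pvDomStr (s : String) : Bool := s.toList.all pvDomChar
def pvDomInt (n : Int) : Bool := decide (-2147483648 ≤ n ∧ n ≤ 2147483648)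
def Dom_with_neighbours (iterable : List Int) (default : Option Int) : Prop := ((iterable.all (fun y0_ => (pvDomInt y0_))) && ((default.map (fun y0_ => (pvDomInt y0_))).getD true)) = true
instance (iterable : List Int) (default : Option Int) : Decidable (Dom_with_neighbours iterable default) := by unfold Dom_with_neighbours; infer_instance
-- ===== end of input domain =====

-- B materializes the input and zips two padded shifted copies instead of threading rolling pred/this/succ through a streaming loop (idiomatic; return-value equivalence; A is a generator, B too).
-- ===== PORT A =====
-- the 'for succ in iterator' loop of A: pred/this are the rolling state
def with_neighbours_loop (default : Option Int) (pred : Option Int) (this : Int) (rest : List Int) : List (Option Int × Int × Option Int) :=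
  match rest with
  | [] => [(pred, this, default)]
  | succ :: r => (pred, this, some succ) :: with_neighbours_loop default (some this) succ r

def with_neighbours (iterable : List Int) (default : Option Int) : List (Option Int × Int × Option Int) :=
  match iterable with
  | [] => []              -- next(iterator) raised StopIteration: yield nothing
  | this :: rest => with_neighbours_loop default default this rest

-- ===== PORT B =====
def with_neighbours_alt (iterable : List Int) (default : Option Int) : List (Option Int × Int × Option Int) :=
  let items := iterable
  let preds := default :: items.dropLast.map some     -- [default] + items[:-1]
  let succs := items.tail.map some ++ [default]       -- items[1:] + [default]
  preds.zip (items.zip succs)                         -- zip(preds, items, succs)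

-- ===== PRECONDITION & SPEC =====
def Spec_with_neighbours (iterable : List Int) (default : Option Int) (out : List (Option Int × Int × Option Int)) : Prop := out = with_neighbours_alt iterable default
instance (iterable : List Int) (default : Option Int) (out : List (Option Int × Int × Option Int)) : Decidable (Spec_with_neighbours iterable default out) := by unfold Spec_with_neighbours; infer_instance

-- ===== CLAIM (what is proved, stated in full; the proofs are below) =====
def Claim_equal_with_neighbours : Prop := ∀ (iterable : List Int) (default : Option Int), Dom_with_neighbours iterable default → Spec_with_neighbours iterable default (with_neighbours iterable default)

-- ===== LEMMAS AND PROOFS =====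

lemma loop_eq_zip (default pred : Option Int) (this : Int) (rest : List Int) :
    with_neighbours_loop default pred this rest =
      (pred :: (this :: rest).dropLast.map some).zip
        ((this :: rest).zip ((this :: rest).tail.map some ++ [default])) := by
  induction rest generalizing pred this with
  | nil => simp [with_neighbours_loop]
  | cons succ r ih =>
      simp [with_neighbours_loop, ih (some this) succ]

-- ===== VERDICT (by name: the statement is the Claim_ definition above) =====
theorem with_neighbours_spec : Claim_equal_with_neighbours := by
  intro iterable default _
  unfold Spec_with_neighbours with_neighbours with_neighbours_alt
  cases iterable with
  | nil => simp
  | cons this rest => simpa using loop_eq_zip default default this rest
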